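-- pv_equiv track=rewrite | github.com/ploffy06/rosalind | KMER.py | kmer
-- ===== SOURCE A (Python) =====
-- import itertools
--
-- def occurrences(string, sub):
--     count = start = 0
--     while True:
--         start = string.find(sub, start) + 1
--         if start > 0:
--             count+=1
--         else:
--             return count
--
-- def kmer(k, dna):
--     k_mers = []
--     for perm in itertools.product('AGTC', repeat=int(k)):
--         str_perm = ''.join(p for p in perm)
--         k_mers.append(str_perm)
--
--     k_mers = sorted(set(k_mers))
--
--     a = []
--     for m in k_mers:
--         a.append(occurrences(dna, m))
--
--     return a
-- ===== SOURCE B (Python) =====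
-- import itertools
--
-- def kmer(k, dna):
--     k = int(k)
--     counts = {}
--     for i in range(len(dna) - k + 1):
--         w = dna[i:i+k]
--         counts[w] = counts.get(w, 0) + 1
--     kmers = sorted(''.join(p) for p in itertools.product('AGTC', repeat=k))
--     return [counts.get(m, 0) for m in kmers]
-- ===== Notes on version B (the rewrite author's own statement) =====
-- stated objective: alternative
-- what changed: Instead of scanning the whole DNA string once per each of the 4^k candidate k-mers with a repeated str.find loop, B makes a single sliding-window pass over the DNA counting every window in a dict and then emits the stored count (default 0) for each candidate in sorted order, dropping the redundant set() dedup of the already-distinct candidates; intended as faster (a timing run read 3.61x at n=256 with A timing out on some inputs, but could not confirm it at the largest size, where the 4^k-sized output dominates both).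
import Mathlib
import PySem

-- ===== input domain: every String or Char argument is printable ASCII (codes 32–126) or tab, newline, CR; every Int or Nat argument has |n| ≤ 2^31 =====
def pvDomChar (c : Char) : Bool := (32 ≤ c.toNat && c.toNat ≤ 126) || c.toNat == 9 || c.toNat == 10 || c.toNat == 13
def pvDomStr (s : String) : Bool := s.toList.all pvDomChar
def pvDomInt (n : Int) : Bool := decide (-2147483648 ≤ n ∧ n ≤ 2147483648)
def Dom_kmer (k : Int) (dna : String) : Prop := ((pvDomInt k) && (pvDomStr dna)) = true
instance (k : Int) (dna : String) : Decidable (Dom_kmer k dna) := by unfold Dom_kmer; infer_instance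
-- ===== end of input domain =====

-- B only changes HOW the counts are computed: one sliding-window pass filling a dict instead of
-- one repeated-str.find scan of the DNA per candidate k-mer (alternative algorithm, same output).

-- ===== PORT A =====

-- itertools.product('AGTC', repeat=n) as lists of chars, in CPython's order (first position
-- varies slowest); hand port (PySem has no `product`), exact for this call shape.
def prodT (alpha : List Char) : Nat → List (List Char)
  | 0 => [[]]
  | n + 1 => alpha.flatMap (fun c => (prodT alpha n).map (fun p => c :: p))

-- the while-True loop of `occurrences`; the fuel only makes the loop structurally total — it
-- never runs out, since `start` strictly increases and stays ≤ len+1 (see occGo_eq below)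
def occGo (s sub : List Char) : Nat → Int → Int → Int
  | 0, count, _ => count
  | fuel + 1, count, start =>
    let start' := PySem.Chars.findFrom s sub start none + 1
    if start' > 0 then occGo s sub fuel (count + 1) start' else count

def occurrences (string sub : String) : Int :=
  occGo string.toList sub.toList (string.toList.length + 2) 0 0

def kmer (k : Int) (dna : String) : List Int :=
  -- ''.join(p for p in perm) over a tuple of single chars is exactly String.ofList perm
  let k_mers := (prodT "AGTC".toList k.toNat).foldl (fun acc perm => acc ++ [String.ofList perm]) []
  let k_mers' := PySem.List.sorted (PySem.Set.ofList k_mers) (fun x => x) false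
  k_mers'.foldl (fun a m => a ++ [occurrences dna m]) []

-- ===== PORT B =====
def kmer_alt (k : Int) (dna : String) : List Int :=
  let n : Int := PySem.Str.len dna
  let counts := (PySem.List.pyRange 0 (n - k + 1)).foldl
    (fun d i =>
      let w := PySem.Str.slice dna (some i) (some (i + k))
      d.insert w (d.getD w 0 + 1)) PySem.Dict.empty
  let kmers := PySem.List.sorted ((prodT "AGTC".toList k.toNat).map (fun p => String.ofList p))
    (fun x => x) false
  kmers.map (fun m => counts.getD m 0)

-- ===== PRECONDITION & SPEC =====
-- Pre_ excludes exactly k < 0, where A raises ValueError (itertools.product, negative repeat).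
def Pre_kmer (k : Int) (dna : String) : Prop := 0 ≤ k
instance (k : Int) (dna : String) : Decidable (Pre_kmer k dna) := by unfold Pre_kmer; infer_instance
def pvWitness_kmer : Int × String := (2, "ACGTAC")

def Spec_kmer (k : Int) (dna : String) (out : List Int) : Prop := out = kmer_alt k dna
instance (k : Int) (dna : String) (out : List Int) : Decidable (Spec_kmer k dna out) := by unfold Spec_kmer; infer_instance

-- ===== CLAIM (what is proved, stated in full; the proofs are below) =====
def Claim_equal_kmer : Prop := ∀ (k : Int) (dna : String), Dom_kmer k dna → Pre_kmer k dna → Spec_kmer k dna (kmer k dna)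

-- ===== LEMMAS AND PROOFS =====

theorem prodT_length (alpha : List Char) (n : Nat) : ∀ p ∈ prodT alpha n, p.length = n := by
  induction n with
  | zero => intro p hp; simp [prodT] at hp; simp [hp]
  | succ n ih =>
    intro p hp
    simp [prodT] at hp
    obtain ⟨c, _, q, hq, rfl⟩ := hp
    simp [ih q hq]

theorem prodT_nodup (alpha : List Char) (hα : alpha.Nodup) (n : Nat) : (prodT alpha n).Nodup := by
  induction n with
  | zero => simp [prodT]
  | succ n ih =>
    rw [prodT, List.nodup_flatMap]
    constructor
    · intro c _
      exact ih.map (fun a b h => by simpa using h)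
    · refine hα.imp ?_
      intro a b hab x hxa hxb
      simp at hxa hxb
      obtain ⟨p, _, rfl⟩ := hxa
      obtain ⟨q, _, h⟩ := hxb
      simp at h
      exact hab h.1.symm

-- findFrom past the end of the string is -1 (directly from the definition)
theorem findFrom_past (s sub : List Char) :
    PySem.Chars.findFrom s sub ((s.length : Int) + 1) none = -1 := by
  simp [PySem.Chars.findFrom]; omega

-- findFrom never points past the end
theorem findFrom_le (s sub : List Char) (k : Nat) (hk : k ≤ s.length) :
    PySem.Chars.findFrom s sub (k : Int) none ≤ (s.length : Int) := by
  simp only [PySem.Chars.findFrom]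
  split
  · omega
  · split
    · omega
    · have := PySem.Chars.find_le_length (List.drop (((k:Int)).toNat) (List.take ((s.length:Int)).toNat s)) sub
      simp at this ⊢
      omega

-- counting a predicate that holds at exactly one more place than another
theorem countP_split {α : Type} [DecidableEq α] (p q : α → Bool) (j : α) :
    ∀ (l : List α), l.Nodup → j ∈ l → (∀ i ∈ l, p i = (i == j || q i)) → q j = false →
      l.countP p = l.countP q + 1 := by
  intro l
  induction l with
  | nil => simp
  | cons a t ih =>
    intro hnd hj h hq
    simp only [List.countP_cons]
    by_cases ha : a = j
    · subst ha
      have hp : p a = true := by rw [h a (by simp)]; simp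
      have hnotin : a ∉ t := (List.nodup_cons.mp hnd).1
      have : t.countP p = t.countP q := by
        apply List.countP_congr
        intro i hi
        rw [h i (by simp [hi])]
        have : i ≠ a := fun e => hnotin (e ▸ hi)
        simp [this]
      rw [hp, hq, this]; simp
    · have hmem : j ∈ t := by cases hj with
        | head => exact absurd rfl ha
        | tail _ h' => exact h'
      have hpa : p a = q a := by
        rw [h a (by simp)]
        simp [ha]
      rw [ih (List.nodup_cons.mp hnd).2 hmem (fun i hi => h i (by simp [hi])) hq, hpa]
      omega

-- the find loop of `occurrences` counts the match positions ≥ start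
theorem occGo_eq (s sub : List Char) :
    ∀ (fuel kk : Nat) (c : Int), kk ≤ s.length + 1 → s.length + 2 - kk ≤ fuel →
      occGo s sub fuel c (kk : Int)
        = c + ((List.range (s.length + 1)).countP
            (fun i => decide (kk ≤ i) && decide (sub <+: s.drop i)) : Int) := by
  intro fuel
  induction fuel with
  | zero => intro kk c hk hf; omega
  | succ fuel ih =>
    intro kk c hk hf
    rw [occGo]
    by_cases hke : kk = s.length + 1
    · subst hke
      have : ((s.length + 1 : Nat) : Int) = (s.length : Int) + 1 := by push_cast; ring
      rw [this, findFrom_past]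
      simp
      intro a _ hla
      exact absurd hla (by omega)
    · have hk' : kk ≤ s.length := by omega
      by_cases hfind : PySem.Chars.findFrom s sub (kk : Int) none = -1
      · rw [hfind]
        have hninf : ¬ sub <:+: s.drop kk :=
          (PySem.Chars.findFrom_natCast_eq_neg_one_iff s sub kk hk').mp hfind
        have hz : (List.range (s.length + 1)).countP
            (fun i => decide (kk ≤ i) && decide (sub <+: s.drop i)) = 0 := by
          apply List.countP_eq_zero.mpr
          intro i _
          by_cases h1 : kk ≤ i
          · by_cases h2 : sub <+: s.drop i
            · exfalso
              apply hninf
              have hsuf : s.drop i <:+ s.drop kk := by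
                have hdd : s.drop i = (s.drop kk).drop (i - kk) := by
                  rw [List.drop_drop]; congr 1; omega
                rw [hdd]; exact List.drop_suffix _ _
              exact h2.isInfix.trans hsuf.isInfix
            · simp [h2]
          · simp [h1]
        simp [hz]
      · obtain ⟨hkj, hpref, hmin⟩ := PySem.Chars.findFrom_natCast_spec s sub kk hk' hfind
        set j := PySem.Chars.findFrom s sub (kk : Int) none with hjdef
        have hj0 : 0 ≤ j := le_trans (by positivity) hkj
        have hjlen : j ≤ (s.length : Int) := findFrom_le s sub kk hk'
        have hcast : j + 1 = (((j.toNat + 1 : Nat)) : Int) := by omega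
        have hpos : j + 1 > 0 := by omega
        rw [if_pos hpos, hcast]
        rw [ih (j.toNat + 1) (c + 1) (by omega) (by omega)]
        have hsplit : (List.range (s.length + 1)).countP
              (fun i => decide (kk ≤ i) && decide (sub <+: s.drop i))
            = (List.range (s.length + 1)).countP
              (fun i => decide (j.toNat + 1 ≤ i) && decide (sub <+: s.drop i)) + 1 := by
          apply countP_split _ _ j.toNat _ (List.nodup_range) (by simp; omega)
          · intro i _
            by_cases hij : i = j.toNat
            · subst hij
              simp [hpref, show kk ≤ j.toNat by omega]
            · by_cases h1 : kk ≤ i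
              · by_cases h2 : i < j.toNat
                · simp [hmin i h1 h2, hij]
                · have : j.toNat + 1 ≤ i := by omega
                  simp [hij, this, h1]
              · have : ¬ (j.toNat + 1 ≤ i) := by omega
                simp [h1, hij, this]
          · simp
        rw [hsplit]
        push_cast
        ring

-- positions past len+1-κ never carry a match of a length-κ pattern
theorem countP_range_trunc (s sub : List Char) (κ : Nat) (hsub : sub.length = κ) :
    (List.range (s.length + 1)).countP (fun i => decide (sub <+: s.drop i))
      = (List.range (s.length + 1 - κ)).countP (fun i => decide (sub <+: s.drop i)) := by
  by_cases hκ : κ ≤ s.length + 1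
  · have hr : s.length + 1 = (s.length + 1 - κ) + κ := by omega
    conv_lhs => rw [hr]
    rw [List.range_add, List.countP_append]
    have hz : ((List.range κ).map (fun x => s.length + 1 - κ + x)).countP
        (fun i => decide (sub <+: s.drop i)) = 0 := by
      apply List.countP_eq_zero.mpr
      intro i hi
      simp only [List.mem_map, List.mem_range] at hi
      obtain ⟨x, hx, rfl⟩ := hi
      simp only [decide_eq_true_eq]
      intro hpre
      have hlen := hpre.length_le
      simp only [List.length_drop] at hlen
      omega
    rw [hz]
    omega
  · have h1 : s.length + 1 - κ = 0 := by omega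
    rw [h1]
    simp only [List.range_zero, List.countP_nil]
    apply List.countP_eq_zero.mpr
    intro i hi
    simp only [List.mem_range] at hi
    simp only [decide_eq_true_eq]
    intro hpre
    have hlen := hpre.length_le
    simp only [List.length_drop] at hlen
    omega

-- pointwise agreement of the two counting methods on a k-mer m of length k
theorem point_eq (dna : String) (k : Int) (hk : 0 ≤ k) (m : String)
    (hm : m.toList.length = k.toNat) :
    occurrences dna m
      = ((PySem.List.pyRange 0 ((PySem.Str.len dna) - k + 1)).foldl
          (fun d i =>
            let w := PySem.Str.slice dna (some i) (some (i + k))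
            d.insert w (d.getD w 0 + 1)) PySem.Dict.empty).getD m 0 := by
  have hkk : k = (k.toNat : Int) := by omega
  -- A side: the find loop counts the match positions
  have hA : occurrences dna m
      = ((List.range (dna.toList.length + 1)).countP
          (fun i => decide (m.toList <+: dna.toList.drop i)) : Int) := by
    unfold occurrences
    have h := occGo_eq dna.toList m.toList (dna.toList.length + 2) 0 0 (by omega) (by omega)
    norm_num at h
    simpa using h
  rw [hA, countP_range_trunc dna.toList m.toList k.toNat hm]
  -- B side: the dict fold counts the windows
  simp only []  -- ζ-reduce the let in the fold body
  rw [← List.foldl_map (f := fun i => PySem.Str.slice dna (some i) (some (i + k)))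
    (g := fun (d : PySem.Dict String Int) x => d.insert x (d.getD x 0 + 1))]
  rw [PySem.Dict.getD_foldl_insert_add_one]
  rw [PySem.List.pyRange_one, List.map_map, List.count_eq_countP, List.countP_map]
  simp only [PySem.Dict.getD_empty, zero_add]
  have hlen : (PySem.Str.len dna - k + 1 - 0).toNat = dna.toList.length + 1 - k.toNat := by
    have : PySem.Str.len dna = (dna.toList.length : Int) := by
      simp [PySem.Str.len_eq]
    omega
  rw [hlen]
  congr 1
  apply List.countP_congr
  intro x hx
  simp only [List.mem_range] at hx
  simp only [Function.comp_apply]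
  rw [Bool.beq_eq_decide_eq]
  have hslice : (PySem.Str.slice dna (some (x : Int)) (some ((x : Int) + k))).toList
      = List.take k.toNat (List.drop x dna.toList) := by
    nth_rewrite 1 [hkk]
    rw [PySem.Str.toList_slice, PySem.Chars.slice_eq_listSlice, PySem.List.slice_natCast_add]
  have hiff : (m.toList <+: List.drop x dna.toList)
      ↔ (PySem.Str.slice dna (some (x : Int)) (some ((x : Int) + k)) = m) := by
    constructor
    · intro hpre
      apply String.ext
      rw [hslice]
      have hpre2 := (List.prefix_iff_eq_take).mp hpre
      rw [hm] at hpre2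
      exact hpre2.symm
    · intro he
      have h2 := congrArg String.toList he
      rw [hslice] at h2
      refine (List.prefix_iff_eq_take).mpr ?_
      rw [hm]
      exact h2.symm
  simp only [decide_eq_true_eq]
  exact hiff

-- ===== VERDICT (by name: the statement is the Claim_ definition above) =====
theorem kmer_spec : Claim_equal_kmer := by
  intro k dna _ hpre
  unfold Spec_kmer kmer kmer_alt
  simp only [PySem.List.foldl_append_singleton_eq_map, List.nil_append]
  rw [PySem.Set.ofList_eq_self_of_nodup _
    ((prodT_nodup "AGTC".toList (by decide) k.toNat).map (fun a b h => by
      simpa using congrArg String.toList h))]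
  apply List.map_congr_left
  intro m hm
  have hmem : m ∈ (prodT "AGTC".toList k.toNat).map (fun p => String.ofList p) :=
    ((PySem.List.sorted_perm _ _ _).mem_iff).mp hm
  obtain ⟨p, hp, rfl⟩ := List.mem_map.mp hmem
  exact point_eq dna k hpre _ (by simpa using prodT_length _ _ p hp)
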